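-- pv_equiv track=rewrite | github.com/miliar/Code_Jam_Webscraper | Solutions_python/Problem_117/1596.py | badRow
-- ===== SOURCE A (Python) =====
-- def badRow(r):
--     count = 0
--     for i in r:
--         if i == 1:
--             count = count + 1
--     if len(r) != count and count > 0:
--         return True
--     return False
-- ===== SOURCE B (Python) =====
-- def badRow(r):
--     return any(x == 1 for x in r) and any(x != 1 for x in r)
-- ===== Notes on version B (the rewrite author's own statement) =====
-- stated objective: simpler
-- what changed: Replaced the counting loop plus length comparison with two short-circuiting existence checks: a 1 is present and a non-1 is present.
import Mathlib
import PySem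

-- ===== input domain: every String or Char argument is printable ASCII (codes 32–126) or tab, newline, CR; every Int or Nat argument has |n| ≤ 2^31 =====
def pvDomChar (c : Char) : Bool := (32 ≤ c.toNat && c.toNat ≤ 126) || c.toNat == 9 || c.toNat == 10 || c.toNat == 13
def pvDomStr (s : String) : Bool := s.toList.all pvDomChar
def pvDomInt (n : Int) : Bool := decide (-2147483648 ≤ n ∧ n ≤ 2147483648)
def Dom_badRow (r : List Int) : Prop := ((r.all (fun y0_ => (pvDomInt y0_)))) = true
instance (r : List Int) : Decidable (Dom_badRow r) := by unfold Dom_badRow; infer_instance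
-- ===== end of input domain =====

-- B replaces A's counting loop with two short-circuit existence checks (simpler).

-- ===== PORT A =====
def badRow (r : List Int) : Bool :=
  let count : Int := r.foldl (fun c i => if i == 1 then c + 1 else c) 0
  if (r.length : Int) ≠ count ∧ count > 0 then true else false

-- ===== PORT B =====
def badRow_alt (r : List Int) : Bool :=
  (r.any (fun x => x == 1)) && (r.any (fun x => x != 1))

-- ===== PRECONDITION & SPEC =====
def Spec_badRow (r : List Int) (out : Bool) : Prop := out = badRow_alt r
instance (r : List Int) (out : Bool) : Decidable (Spec_badRow r out) := by unfold Spec_badRow; infer_instance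

-- ===== CLAIM (what is proved, stated in full; the proofs are below) =====
def Claim_equal_badRow : Prop := ∀ (r : List Int), Dom_badRow r → Spec_badRow r (badRow r)

-- ===== LEMMAS AND PROOFS =====
theorem badRow_foldl_count (r : List Int) (c : Int) :
    r.foldl (fun c i => if i == 1 then c + 1 else c) c
      = c + ((r.filter (fun i => i == 1)).length : Int) := by
  induction r generalizing c with
  | nil => simp
  | cons x xs ih =>
    simp only [List.foldl_cons, List.filter_cons]
    rw [ih]
    by_cases h : x = 1
    · simp [h]; ring
    · simp [h]

theorem badRow_eq (r : List Int) : badRow r = badRow_alt r := by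
  unfold badRow badRow_alt
  rw [badRow_foldl_count]
  simp only [zero_add]
  set k := (r.filter (fun i => i == 1)).length with hk
  have hle : k ≤ r.length := List.length_filter_le _ _
  by_cases hmem : (1:Int) ∈ r
  · have hk0 : 0 < k := by
      have h1 : (1:Int) ∈ r.filter (fun i => i == 1) :=
        List.mem_filter.mpr ⟨hmem, by simp⟩
      rw [hk]; exact List.length_pos_of_mem h1
    by_cases hall : ∀ x ∈ r, x = (1:Int)
    · have hfe : r.filter (fun i => i == 1) = r :=
        List.filter_eq_self.mpr (fun x hx => by simp [hall x hx])
      have hkl : k = r.length := by rw [hk, hfe]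
      have hany2 : (r.any fun x => x != 1) = false := by
        simp only [List.any_eq_false]
        intro x hx; simp [hall x hx]
      have hcond : ¬(((r.length : Int) ≠ (k : Int)) ∧ (k : Int) > 0) := by omega
      rw [if_neg hcond, hany2]
      simp
    · push_neg at hall
      obtain ⟨x, hx, hxne⟩ := hall
      have hkl : k < r.length := by
        rw [hk]
        exact List.length_filter_lt_length_iff_exists.mpr ⟨x, hx, by simp [hxne]⟩
      have hany1 : (r.any fun x => x == 1) = true := by
        simp only [List.any_eq_true]; exact ⟨1, hmem, by simp⟩
      have hany2 : (r.any fun x => x != 1) = true := by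
        simp only [List.any_eq_true]; exact ⟨x, hx, by simp [hxne]⟩
      have hcond : (((r.length : Int) ≠ (k : Int)) ∧ (k : Int) > 0) := by omega
      rw [if_pos hcond, hany1, hany2]
      rfl
  · have hfe : r.filter (fun i => i == 1) = [] := by
      apply List.filter_eq_nil_iff.mpr
      intro a ha
      simp only [beq_iff_eq]
      intro h; subst h; exact hmem ha
    have hk0 : k = 0 := by rw [hk, hfe]; rfl
    have hany1 : (r.any fun x => x == 1) = false := by
      simp only [List.any_eq_false]
      intro x hx
      simp only [beq_iff_eq]
      intro h; subst h; exact hmem hx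
    have hcond : ¬(((r.length : Int) ≠ (k : Int)) ∧ (k : Int) > 0) := by omega
    rw [if_neg hcond, hany1]
    simp

-- ===== VERDICT (by name: the statement is the Claim_ definition above) =====
theorem badRow_spec : Claim_equal_badRow := by
  intro r _
  unfold Spec_badRow
  exact badRow_eq r
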